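-- pv_equiv track=rewrite | github.com/Abrazi/scada_scout | src/protocols/iec61850/adapter.py | _get_control_object_reference
-- ===== SOURCE A (Python) =====
-- def _get_control_object_reference(address: str) -> str:
--     """Extract the Control Object Reference (DO path) and strip device prefix."""
--     if not address: return None
--
--     # Strip device name prefix if present (format: "DeviceName::LD/LN.DO")
--     if "::" in address:
--         address = address.split("::", 1)[1]
--
--     # Order matters: try longer suffixes first to avoid partial matches
--     suffixes = [".Oper.ctlVal", ".SBO.ctlVal", ".SBOw.ctlVal", ".Cancel.ctlVal",
--                 ".Oper", ".SBO", ".SBOw", ".Cancel",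
--                 ".ctlVal", ".stVal", ".q", ".t"]
--     for suffix in suffixes:
--         if address.endswith(suffix):
--             return address[:-len(suffix)]
--     return address
-- ===== SOURCE B (Python) =====
-- _VALUE_TOKENS = ("stVal", "q", "t")
-- _CONTROL_TOKENS = ("Oper", "SBO", "SBOw", "Cancel")
--
-- def _get_control_object_reference(address: str) -> str:
--     """Split at the last '.' (rpartition) and classify the final token,
--     instead of scanning a list of 12 composite suffixes."""
--     if not address:
--         return None
--     if "::" in address:
--         address = address.split("::", 1)[1]
--     head, sep, last = address.rpartition(".")
--     if not sep:
--         return address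
--     if last in _VALUE_TOKENS or last in _CONTROL_TOKENS:
--         return head
--     if last == "ctlVal":
--         h2, s2, l2 = head.rpartition(".")
--         if s2 and l2 in _CONTROL_TOKENS:
--             return h2
--         return head
--     return address
-- ===== Notes on version B (the rewrite author's own statement) =====
-- stated objective: alternative
-- what changed: A scans an ordered list of 12 composite suffixes with endswith and negative slicing; B rpartitions the address at its last dot once and classifies the final token (value token, control token, or ctlVal with one more rpartition of the head).
import Mathlib
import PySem

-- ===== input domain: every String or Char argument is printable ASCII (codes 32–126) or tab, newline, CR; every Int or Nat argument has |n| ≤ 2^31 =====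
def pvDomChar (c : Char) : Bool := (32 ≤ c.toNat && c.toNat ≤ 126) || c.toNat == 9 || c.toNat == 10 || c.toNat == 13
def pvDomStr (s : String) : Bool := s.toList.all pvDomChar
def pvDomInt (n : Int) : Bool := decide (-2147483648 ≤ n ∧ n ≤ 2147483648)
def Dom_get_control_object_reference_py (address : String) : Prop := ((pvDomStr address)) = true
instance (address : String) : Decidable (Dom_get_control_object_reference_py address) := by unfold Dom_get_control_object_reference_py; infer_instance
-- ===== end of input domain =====

-- B replaces A's scan over a list of 12 composite suffixes by splitting the address
-- at its last dot (rpartition) and classifying the final token; objective: alternative.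

-- ===== PORT A =====
-- A's literal suffix list, in A's order
def pvSuffixes : List (List Char) :=
  [".Oper.ctlVal".toList, ".SBO.ctlVal".toList, ".SBOw.ctlVal".toList, ".Cancel.ctlVal".toList,
   ".Oper".toList, ".SBO".toList, ".SBOw".toList, ".Cancel".toList,
   ".ctlVal".toList, ".stVal".toList, ".q".toList, ".t".toList]

-- the 'for suffix in suffixes' loop: first matching suffix wins, return address[:-len(suffix)]
def pvTrySuffixes (ss : List (List Char)) (a : List Char) : List Char :=
  match ss with
  | [] => a
  | s :: rest =>
    if PySem.Chars.endswith a s then PySem.List.slice a none (some (-(s.length : Int)))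
    else pvTrySuffixes rest a

def get_control_object_reference_py (address : String) : Option String :=
  let a0 := address.toList
  if a0 = [] then none
  else
    let a := if PySem.Chars.isIn "::".toList a0 then PySem.List.pyGetD (PySem.Chars.splitOnMax a0 "::".toList 1) 1 [] else a0
    some (String.ofList (pvTrySuffixes pvSuffixes a))

-- ===== PORT B =====
def pvValueTokens : List (List Char) := ["stVal".toList, "q".toList, "t".toList]
def pvControlTokens : List (List Char) := ["Oper".toList, "SBO".toList, "SBOw".toList, "Cancel".toList]

-- address.rpartition of the dot as (head, found?, last) — hand port (PySem has no rpartition)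
def pvRpartDot (a : List Char) : List Char × Bool × List Char :=
  match a.reverse.dropWhile (· ≠ '.') with
  | [] => ([], false, a)
  | _ :: hRev => (hRev.reverse, true, (a.reverse.takeWhile (· ≠ '.')).reverse)

def pvAltCore (a : List Char) : List Char :=
  match pvRpartDot a with
  | (_, false, _) => a
  | (head, true, last) =>
    if last ∈ pvValueTokens ∨ last ∈ pvControlTokens then head
    else if last = "ctlVal".toList then
      match pvRpartDot head with
      | (h2, true, l2) => if l2 ∈ pvControlTokens then h2 else head
      | (_, false, _) => head
    else a

def get_control_object_reference_py_alt (address : String) : Option String :=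
  let a0 := address.toList
  if a0 = [] then none
  else
    let a := if PySem.Chars.isIn "::".toList a0 then PySem.List.pyGetD (PySem.Chars.splitOnMax a0 "::".toList 1) 1 [] else a0
    some (String.ofList (pvAltCore a))

-- ===== PRECONDITION & SPEC =====
def Spec_get_control_object_reference_py (address : String) (out : Option String) : Prop := out = get_control_object_reference_py_alt address
instance (address : String) (out : Option String) : Decidable (Spec_get_control_object_reference_py address out) := by unfold Spec_get_control_object_reference_py; infer_instance

-- ===== CLAIM (what is proved, stated in full; the proofs are below) =====
def Claim_equal_get_control_object_reference_py : Prop := ∀ (address : String), Dom_get_control_object_reference_py address → Spec_get_control_object_reference_py address (get_control_object_reference_py address)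

-- ===== LEMMAS AND PROOFS =====

-- the suffix list, written with its structure ('.' , token, optional '.ctlVal') explicit
theorem pvSuffixes_eq : pvSuffixes =
  ['.' :: ("Oper".toList ++ '.' :: "ctlVal".toList), '.' :: ("SBO".toList ++ '.' :: "ctlVal".toList),
   '.' :: ("SBOw".toList ++ '.' :: "ctlVal".toList), '.' :: ("Cancel".toList ++ '.' :: "ctlVal".toList),
   '.' :: "Oper".toList, '.' :: "SBO".toList, '.' :: "SBOw".toList, '.' :: "Cancel".toList,
   '.' :: "ctlVal".toList, '.' :: "stVal".toList, '.' :: "q".toList, '.' :: "t".toList] := by decide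

-- rpartition on a dot-free string finds nothing
theorem pvRpart_none {a : List Char} (h : '.' ∉ a) : pvRpartDot a = ([], false, a) := by
  unfold pvRpartDot
  have hd : a.reverse.dropWhile (fun x => !decide (x = '.')) = [] := by
    rw [List.dropWhile_eq_nil_iff]
    intro x hx
    simp only [List.mem_reverse] at hx
    simp only [Bool.not_eq_eq_eq_not, Bool.not_true, decide_eq_false_iff_not]
    rintro rfl; exact h hx
  simp [hd]

-- rpartition splits at the last dot
theorem pvRpart_some (h t : List Char) (ht : '.' ∉ t) : pvRpartDot (h ++ '.' :: t) = (h, true, t) := by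
  unfold pvRpartDot
  have hall : ∀ x ∈ t.reverse, ((decide (x ≠ '.')) = true) := by
    intro x hx
    simp only [List.mem_reverse] at hx
    simp only [ne_eq, decide_eq_true_eq]
    rintro rfl; exact ht hx
  have hrev : (h ++ '.' :: t).reverse = t.reverse ++ '.' :: h.reverse := by simp
  rw [hrev, List.dropWhile_append_of_pos hall, List.takeWhile_append_of_pos hall]
  simp

-- every address is dot-free or ends in a dot-free tail after its last dot
theorem pvRpart_shape (a : List Char) : ('.' ∉ a) ∨ ∃ h t, a = h ++ '.' :: t ∧ '.' ∉ t := by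
  induction a with
  | nil => exact Or.inl (by simp)
  | cons c a ih =>
    by_cases hc : c = '.'
    · subst hc
      rcases ih with hna | ⟨h, t, rfl, ht⟩
      · exact Or.inr ⟨[], a, rfl, hna⟩
      · exact Or.inr ⟨'.' :: h, t, rfl, ht⟩
    · rcases ih with hna | ⟨h, t, rfl, ht⟩
      · refine Or.inl ?_
        intro hm
        rcases List.mem_cons.mp hm with h1 | h1
        · exact hc h1.symm
        · exact hna h1
      · exact Or.inr ⟨c :: h, t, rfl, ht⟩

-- a suffix containing '.' cannot end a dot-free string
theorem pvEndswith_false_of_nodot {a s : List Char} (ha : '.' ∉ a) (hs : '.' ∈ s) :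
    PySem.Chars.endswith a s = false := by
  rw [Bool.eq_false_iff]
  intro h
  exact ha (((PySem.Chars.endswith_iff a s).mp h).subset hs)

theorem pvSuffix_append_cancel (u w v : List Char) : (u ++ v <:+ w ++ v) ↔ u <:+ w := by
  rw [← List.reverse_prefix, ← List.reverse_prefix, List.reverse_append, List.reverse_append]
  exact List.prefix_append_right_inj _

-- key: a dot-headed, dot-free suffix '.tok' matches iff tok IS the token after the last dot
theorem pvSUF {h t tok : List Char} (ht : '.' ∉ t) (htok : '.' ∉ tok) :
    ('.' :: tok <:+ h ++ '.' :: t) ↔ tok = t := by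
  constructor
  · intro hsuf
    rcases List.suffix_or_suffix_of_suffix hsuf (List.suffix_append h ('.' :: t)) with h1 | h1
    · rcases List.suffix_cons_iff.mp h1 with he | h2
      · simpa using he
      · exact absurd (h2.subset (by simp)) ht
    · rcases List.suffix_cons_iff.mp h1 with he | h2
      · simpa using he.symm
      · exact absurd (h2.subset (by simp)) htok
  · rintro rfl; exact List.suffix_append h _

theorem pvEndswith_simple (h t tok : List Char) (ht : '.' ∉ t) (htok : '.' ∉ tok) :
    PySem.Chars.endswith (h ++ '.' :: t) ('.' :: tok) = decide (tok = t) := by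
  by_cases hc : tok = t
  · subst hc
    rw [decide_eq_true rfl]
    exact (PySem.Chars.endswith_iff _ _).mpr ((pvSUF ht htok).mpr rfl)
  · rw [decide_eq_false hc, Bool.eq_false_iff]
    intro hw
    exact hc ((pvSUF ht htok).mp ((PySem.Chars.endswith_iff _ _).mp hw))

theorem pvEndswith_comb (h t ctl : List Char) (ht : '.' ∉ t) :
    PySem.Chars.endswith (h ++ '.' :: t) ('.' :: (ctl ++ '.' :: "ctlVal".toList)) =
      (decide (t = "ctlVal".toList) && PySem.Chars.endswith h ('.' :: ctl)) := by
  by_cases hc : t = "ctlVal".toList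
  · subst hc
    rw [decide_eq_true rfl, Bool.true_and, Bool.eq_iff_iff,
        PySem.Chars.endswith_iff, PySem.Chars.endswith_iff]
    exact pvSuffix_append_cancel ('.' :: ctl) h ('.' :: "ctlVal".toList)
  · rw [decide_eq_false hc, Bool.false_and, Bool.eq_false_iff]
    intro hw
    have h1 : ('.' :: "ctlVal".toList) <:+ ('.' :: (ctl ++ '.' :: "ctlVal".toList)) :=
      List.suffix_append ('.' :: ctl) ('.' :: "ctlVal".toList)
    have h2 := h1.trans ((PySem.Chars.endswith_iff _ _).mp hw)
    exact hc ((pvSUF ht (by decide)).mp h2).symm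

theorem pvSlice_drop (u v : List Char) (hv : v ≠ []) :
    PySem.List.slice (u ++ v) none (some (-(v.length : Int))) = u := by
  rw [PySem.List.slice_to_neg_natCast (xs := u ++ v) (k := v.length) (List.length_pos_of_ne_nil hv)]
  rw [List.length_append, Nat.add_sub_cancel]
  exact List.take_left

theorem pvSliceLit (u v : List Char) (n : Int) (hn : n = (v.length : Int)) (hv : v ≠ []) :
    PySem.List.slice (u ++ v) none (some (-n)) = u := by
  subst hn; exact pvSlice_drop u v hv

theorem pvSliceMid (u w v : List Char) (n : Int) (hn : n = (v.length : Int)) (hv : v ≠ []) :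
    PySem.List.slice (u ++ '.' :: (w ++ v)) none (some (-n)) = u ++ '.' :: w := by
  subst hn
  rw [show u ++ '.' :: (w ++ v) = (u ++ '.' :: w) ++ v by simp]
  exact pvSlice_drop (u ++ '.' :: w) v hv

-- the heart: A's suffix scan equals B's rpartition classification, on any address
theorem pvCore_eq (a : List Char) : pvTrySuffixes pvSuffixes a = pvAltCore a := by
  rcases pvRpart_shape a with hna | ⟨h, t, rfl, ht⟩
  · have hf : ∀ s : List Char, '.' ∈ s → PySem.Chars.endswith a s = false :=
      fun s hs => pvEndswith_false_of_nodot hna hs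
    rw [pvSuffixes_eq]
    simp only [pvTrySuffixes]
    rw [hf _ (by simp), hf _ (by simp), hf _ (by simp), hf _ (by simp), hf _ (by simp),
        hf _ (by simp), hf _ (by simp), hf _ (by simp), hf _ (by simp), hf _ (by simp),
        hf _ (by simp), hf _ (by simp)]
    simp only [Bool.false_eq_true, if_false]
    unfold pvAltCore
    rw [pvRpart_none hna]
  · rw [pvSuffixes_eq]
    simp only [pvTrySuffixes]
    rw [pvEndswith_comb h t "Oper".toList ht, pvEndswith_comb h t "SBO".toList ht,
        pvEndswith_comb h t "SBOw".toList ht, pvEndswith_comb h t "Cancel".toList ht,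
        pvEndswith_simple h t "Oper".toList ht (by decide),
        pvEndswith_simple h t "SBO".toList ht (by decide),
        pvEndswith_simple h t "SBOw".toList ht (by decide),
        pvEndswith_simple h t "Cancel".toList ht (by decide),
        pvEndswith_simple h t "ctlVal".toList ht (by decide),
        pvEndswith_simple h t "stVal".toList ht (by decide),
        pvEndswith_simple h t "q".toList ht (by decide),
        pvEndswith_simple h t "t".toList ht (by decide)]
    unfold pvAltCore
    rw [pvRpart_some h t ht]
    by_cases h1 : t = ['c', 't', 'l', 'V', 'a', 'l']
    · subst h1
      rcases pvRpart_shape h with hnh | ⟨h2, t2, rfl, ht2⟩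
      · have hf : ∀ ctl : List Char, PySem.Chars.endswith h ('.' :: ctl) = false :=
          fun ctl => pvEndswith_false_of_nodot hnh (by simp)
        simp [hf, pvSliceLit, pvValueTokens, pvControlTokens, pvRpart_none hnh]
      · rw [pvEndswith_simple h2 t2 "Oper".toList ht2 (by decide),
            pvEndswith_simple h2 t2 "SBO".toList ht2 (by decide),
            pvEndswith_simple h2 t2 "SBOw".toList ht2 (by decide),
            pvEndswith_simple h2 t2 "Cancel".toList ht2 (by decide)]
        have hrs := pvRpart_some h2 t2 ht2
        by_cases c1 : t2 = ['O', 'p', 'e', 'r']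
        · subst c1
          have hrs2 : pvRpartDot (h2 ++ ['.', 'O', 'p', 'e', 'r']) = (h2, true, ['O', 'p', 'e', 'r']) :=
            pvRpart_some h2 ['O', 'p', 'e', 'r'] (by decide)
          simp [pvSliceLit, pvValueTokens, pvControlTokens, hrs2]
        by_cases c2 : t2 = ['S', 'B', 'O']
        · subst c2
          have hrs2 : pvRpartDot (h2 ++ ['.', 'S', 'B', 'O']) = (h2, true, ['S', 'B', 'O']) :=
            pvRpart_some h2 ['S', 'B', 'O'] (by decide)
          simp [pvSliceLit, pvValueTokens, pvControlTokens, c1, hrs2]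
        by_cases c3 : t2 = ['S', 'B', 'O', 'w']
        · subst c3
          have hrs2 : pvRpartDot (h2 ++ ['.', 'S', 'B', 'O', 'w']) = (h2, true, ['S', 'B', 'O', 'w']) :=
            pvRpart_some h2 ['S', 'B', 'O', 'w'] (by decide)
          simp [pvSliceLit, pvValueTokens, pvControlTokens, c1, c2, hrs2]
        by_cases c4 : t2 = ['C', 'a', 'n', 'c', 'e', 'l']
        · subst c4
          have hrs2 : pvRpartDot (h2 ++ ['.', 'C', 'a', 'n', 'c', 'e', 'l']) = (h2, true, ['C', 'a', 'n', 'c', 'e', 'l']) :=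
            pvRpart_some h2 ['C', 'a', 'n', 'c', 'e', 'l'] (by decide)
          simp [pvSliceLit, pvValueTokens, pvControlTokens, c1, c2, c3, hrs2]
        · have c1' : ¬(['O', 'p', 'e', 'r'] = t2) := fun hh => c1 hh.symm
          have c2' : ¬(['S', 'B', 'O'] = t2) := fun hh => c2 hh.symm
          have c3' : ¬(['S', 'B', 'O', 'w'] = t2) := fun hh => c3 hh.symm
          have c4' : ¬(['C', 'a', 'n', 'c', 'e', 'l'] = t2) := fun hh => c4 hh.symm
          simp [pvSliceMid, pvValueTokens, pvControlTokens, c1, c2, c3, c4, c1', c2', c3', c4', hrs]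
    by_cases v1 : t = ['s', 't', 'V', 'a', 'l']
    · subst v1
      simp [pvSliceLit, pvValueTokens, pvControlTokens]
    by_cases v2 : t = ['q']
    · subst v2
      simp [pvSliceLit, pvValueTokens, pvControlTokens]
    by_cases v3 : t = ['t']
    · subst v3
      simp [pvSliceLit, pvValueTokens, pvControlTokens]
    by_cases k1 : t = ['O', 'p', 'e', 'r']
    · subst k1
      simp [pvSliceLit, pvValueTokens, pvControlTokens]
    by_cases k2 : t = ['S', 'B', 'O']
    · subst k2
      simp [pvSliceLit, pvValueTokens, pvControlTokens]
    by_cases k3 : t = ['S', 'B', 'O', 'w']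
    · subst k3
      simp [pvSliceLit, pvValueTokens, pvControlTokens]
    by_cases k4 : t = ['C', 'a', 'n', 'c', 'e', 'l']
    · subst k4
      simp [pvSliceLit, pvValueTokens, pvControlTokens]
    · have h1' : ¬(['c', 't', 'l', 'V', 'a', 'l'] = t) := fun hh => h1 hh.symm
      have v1' : ¬(['s', 't', 'V', 'a', 'l'] = t) := fun hh => v1 hh.symm
      have v2' : ¬(['q'] = t) := fun hh => v2 hh.symm
      have v3' : ¬(['t'] = t) := fun hh => v3 hh.symm
      have k1' : ¬(['O', 'p', 'e', 'r'] = t) := fun hh => k1 hh.symm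
      have k2' : ¬(['S', 'B', 'O'] = t) := fun hh => k2 hh.symm
      have k3' : ¬(['S', 'B', 'O', 'w'] = t) := fun hh => k3 hh.symm
      have k4' : ¬(['C', 'a', 'n', 'c', 'e', 'l'] = t) := fun hh => k4 hh.symm
      simp [pvValueTokens, pvControlTokens, h1, v1, v2, v3, k1, k2, k3, k4,
            h1', v1', v2', v3', k1', k2', k3', k4']

-- ===== VERDICT (by name: the statement is the Claim_ definition above) =====
theorem get_control_object_reference_py_spec : Claim_equal_get_control_object_reference_py := by
  intro address _
  unfold Spec_get_control_object_reference_py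
  unfold get_control_object_reference_py get_control_object_reference_py_alt
  by_cases he : address.toList = []
  · simp [he]
  · simp only [he, if_false]
    rw [pvCore_eq]
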